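-- pv_equiv track=rewrite | github.com/XianfengJiao/shapelet_gnn | build_shapelet_co-occu_graph.py | reshape_data
-- ===== SOURCE A (Python) =====
-- def reshape_data(data):
--     patient_num = len(data[0])
--     data_r = [[] for _ in range(patient_num)]
--
--     for f_i, f_data in enumerate(data):
--         for p_i, p_data in enumerate(f_data):
--             for seg_i, seg_data in enumerate(p_data):
--                 if f_i == 0:
--                     data_r[p_i].append([])
--                 data_r[p_i][seg_i].append(seg_data)
--     return data_r
-- ===== SOURCE B (Python) =====
-- def reshape_data(data):
--     result = []
--     for p, pat0 in enumerate(data[0]):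
--         row = [[] for _ in pat0]
--         for f in data:
--             for s, seg in enumerate(f[p] if p < len(f) else []):
--                 row[s].append(seg)
--         result.append(row)
--     return result
-- ===== Notes on version B (the rewrite author's own statement) =====
-- stated objective: alternative
-- what changed: Replaces A's feature-outer triple loop, which mutates one shared patient-indexed accumulator and bootstraps each row with an 'f_i == 0' append trick, by a patient-major traversal that allocates each patient's row once from data[0]'s segment count and fills it locally from every feature, never touching other patients' state.
import Mathlib
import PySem

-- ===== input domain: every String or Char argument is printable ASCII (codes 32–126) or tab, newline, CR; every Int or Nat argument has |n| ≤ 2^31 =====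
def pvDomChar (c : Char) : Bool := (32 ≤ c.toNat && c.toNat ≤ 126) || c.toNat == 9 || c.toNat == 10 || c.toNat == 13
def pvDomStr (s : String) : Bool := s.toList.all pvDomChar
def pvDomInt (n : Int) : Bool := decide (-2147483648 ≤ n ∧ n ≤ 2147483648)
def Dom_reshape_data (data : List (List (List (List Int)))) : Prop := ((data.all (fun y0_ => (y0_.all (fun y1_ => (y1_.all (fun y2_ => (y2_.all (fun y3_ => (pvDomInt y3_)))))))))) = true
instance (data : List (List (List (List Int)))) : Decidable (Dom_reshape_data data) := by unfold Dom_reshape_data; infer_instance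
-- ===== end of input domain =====

-- B replaces A's feature-outer triple loop (which mutates a shared patient-indexed accumulator
-- and bootstraps rows with an `f_i == 0` append trick) by a patient-major traversal that builds
-- each patient's row locally, sized once from data[0]; objective: alternative (same cost).

-- ===== PORT A =====
-- `for seg_i, seg_data in enumerate(p_data): ...` ; `data_r[p_i][seg_i].append(..)` is
-- List.modify at p_i then at seg_i (in-range under Pre_, so modify is exact there).
def pvSegLoop (f_i p_i : Nat) (segs : List (List Int)) (seg_i : Nat)
    (dr : List (List (List (List Int)))) : List (List (List (List Int))) :=
  match segs with
  | [] => dr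
  | seg :: rest =>
      let dr := if f_i = 0 then dr.modify p_i (fun row => row ++ [[]]) else dr
      let dr := dr.modify p_i (fun row => row.modify seg_i (fun cell => cell ++ [seg]))
      pvSegLoop f_i p_i rest (seg_i + 1) dr

-- `for p_i, p_data in enumerate(f_data): ...`
def pvPatLoop (f_i : Nat) (pats : List (List (List Int))) (p_i : Nat)
    (dr : List (List (List (List Int)))) : List (List (List (List Int))) :=
  match pats with
  | [] => dr
  | pd :: rest => pvPatLoop f_i rest (p_i + 1) (pvSegLoop f_i p_i pd 0 dr)

-- `for f_i, f_data in enumerate(data): ...`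
def pvFeatLoop (feats : List (List (List (List Int)))) (f_i : Nat)
    (dr : List (List (List (List Int)))) : List (List (List (List Int))) :=
  match feats with
  | [] => dr
  | f :: rest => pvFeatLoop rest (f_i + 1) (pvPatLoop f_i f 0 dr)

-- `data[0]` raises on empty data (outside Pre_); headD [] is exact elsewhere.
def reshape_data (data : List (List (List (List Int)))) : List (List (List (List Int))) :=
  let patient_num := (data.headD []).length
  pvFeatLoop data 0 (List.replicate patient_num [])

-- ===== PORT B =====
-- literal transliteration of Source B. The inner `for s, seg in enumerate(...): row[s].append(seg)`
-- is pvRowFill (List.modify at s; in-range under Pre_, so modify is exact there); the feature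
-- loop is a foldl over `data`; the outer `for p, pat0 in enumerate(data[0])` with append is
-- pvPatRows. `data[0]` raises on empty data (outside Pre_); headD [] is exact elsewhere.
def pvRowFill (row : List (List (List Int))) (s : Nat) (segs : List (List Int)) :
    List (List (List Int)) :=
  match segs with
  | [] => row
  | x :: rest => pvRowFill (row.modify s (fun c => c ++ [x])) (s + 1) rest

def pvPatRows (data : List (List (List (List Int)))) (pats : List (List (List Int)))
    (p : Nat) : List (List (List (List Int))) :=
  match pats with
  | [] => []
  | pat0 :: rest =>
      (data.foldl (fun row f => pvRowFill row 0 (if p < f.length then f.getD p [] else []))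
        (List.replicate pat0.length [])) :: pvPatRows data rest (p + 1)

def reshape_data_alt (data : List (List (List (List Int)))) : List (List (List (List Int))) :=
  pvPatRows data (data.headD []) 0

-- ===== PRECONDITION & SPEC =====
-- Pre_ is exactly the inputs on which A returns (no IndexError): data nonempty, no feature
-- entry for a patient p < len(data[0]) has more segments than data[0] gave that patient, and
-- features reaching past data[0]'s patient count carry only empty patients there. Outside Pre_
-- A raises IndexError (empty data in `data[0]`, or `data_r[p_i][seg_i]` out of range).
def Pre_reshape_data (data : List (List (List (List Int)))) : Prop :=
  data ≠ [] ∧ ∀ f ∈ data, ∀ p ∈ List.range f.length,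
    (p < (data.headD []).length →
      (f.getD p []).length ≤ ((data.headD []).getD p []).length) ∧
    ((data.headD []).length ≤ p → f.getD p [] = [])
instance (data : List (List (List (List Int)))) : Decidable (Pre_reshape_data data) := by
  unfold Pre_reshape_data; infer_instance

def pvWitness_reshape_data : List (List (List (List Int))) := [[[[1], [2]], [[3]]], [[[4]], [[6]]]]

def Spec_reshape_data (data : List (List (List (List Int)))) (out : List (List (List (List Int)))) : Prop := out = reshape_data_alt data
instance (data : List (List (List (List Int)))) (out : List (List (List (List Int)))) : Decidable (Spec_reshape_data data out) := by unfold Spec_reshape_data; infer_instance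

-- ===== CLAIM (what is proved, stated in full; the proofs are below) =====
def Claim_equal_reshape_data : Prop := ∀ (data : List (List (List (List Int)))), Dom_reshape_data data → Pre_reshape_data data → Spec_reshape_data data (reshape_data data)

-- ===== LEMMAS AND PROOFS =====

-- B's inner cell, gathered over a list of features
def pvCell (fs : List (List (List (List Int)))) (p s : Nat) : List (List Int) :=
  fs.filterMap (fun f =>
    if p < f.length ∧ s < (f.getD p []).length then some ((f.getD p []).getD s []) else none)

-- the row transformer a single feature-0 patient loop body performs
def pvRow0 (row : List (List (List Int))) (seg_i : Nat) (segs : List (List Int)) :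
    List (List (List Int)) :=
  match segs with
  | [] => row
  | x :: rest => pvRow0 ((row ++ [[]]).modify seg_i (fun c => c ++ [x])) (seg_i + 1) rest

theorem modify_id_same {α : Type} (l : List α) (i : Nat) :
    l.modify i (fun x => x) = l := by
  induction l generalizing i with
  | nil => simp
  | cons a l ih =>
    cases i with
    | zero => simp [List.modify]
    | succ n => simpa [List.modify] using ih n

theorem modify_modify_same {α : Type} (l : List α) (i : Nat) (f g : α → α) :
    (l.modify i f).modify i g = l.modify i (fun x => g (f x)) := by
  induction l generalizing i with
  | nil => simp
  | cons a l ih =>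
    cases i with
    | zero => simp [List.modify]
    | succ n => simpa [List.modify] using ih n

theorem getElem?_modify' {α : Type} (l : List α) (i : Nat) (f : α → α) (j : Nat) :
    (l.modify i f)[j]? = if i = j then (l[j]?).map f else l[j]? := by
  rw [List.getElem?_modify]
  by_cases h : i = j <;> cases l[j]? <;> simp [h]

theorem segLoop_zero (p_i : Nat) (segs : List (List Int)) (seg_i : Nat)
    (dr : List (List (List (List Int)))) :
    pvSegLoop 0 p_i segs seg_i dr = dr.modify p_i (fun row => pvRow0 row seg_i segs) := by
  induction segs generalizing seg_i dr with
  | nil => simp [pvSegLoop, pvRow0, modify_id_same]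
  | cons x rest ih =>
    simp only [pvSegLoop, pvRow0, reduceIte, ih, modify_modify_same]

-- A's seg loop for f_i ≠ 0 is B's row filler applied at the patient's row
theorem segLoop_ne (f_i p_i : Nat) (h : f_i ≠ 0) (segs : List (List Int)) (seg_i : Nat)
    (dr : List (List (List (List Int)))) :
    pvSegLoop f_i p_i segs seg_i dr = dr.modify p_i (fun row => pvRowFill row seg_i segs) := by
  induction segs generalizing seg_i dr with
  | nil => simp [pvSegLoop, pvRowFill, modify_id_same]
  | cons x rest ih =>
    simp only [pvSegLoop, pvRowFill, if_neg h, ih, modify_modify_same]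

theorem row0_full (segs : List (List Int)) (row : List (List (List Int)))
    (h : seg_i = row.length) :
    pvRow0 row seg_i segs = row ++ segs.map (fun x => [x]) := by
  induction segs generalizing row seg_i with
  | nil => simp [pvRow0]
  | cons x rest ih =>
    have hmod : (row ++ [[]]).modify seg_i (fun c => c ++ [x]) = row ++ [[x]] := by
      subst h
      induction row with
      | nil => simp [List.modify]
      | cons a r ih2 => simpa [List.modify] using ih2
    rw [pvRow0, hmod, ih (row := row ++ [[x]]) (by simp [h])]
    simp

theorem rowA_get (segs : List (List Int)) (row : List (List (List Int))) (seg_i j : Nat) :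
    (pvRowFill row seg_i segs)[j]? =
      if seg_i ≤ j ∧ j < seg_i + segs.length then
        (row[j]?).map (fun c => c ++ [segs.getD (j - seg_i) []])
      else row[j]? := by
  induction segs generalizing row seg_i with
  | nil =>
    show row[j]? = _
    rw [if_neg (by simp only [List.length_nil, Nat.add_zero]; omega)]
  | cons x rest ih =>
    simp only [List.length_cons]
    rw [pvRowFill, ih, getElem?_modify']
    by_cases hj : seg_i = j
    · subst hj
      rw [if_neg (by omega), if_pos rfl, if_pos (by omega), Nat.sub_self]
      cases row[seg_i]? <;> simp
    · by_cases h2 : seg_i + 1 ≤ j ∧ j < seg_i + 1 + rest.length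
      · rw [if_pos h2, if_neg hj, if_pos (by omega)]
        have h3 : j - seg_i = (j - (seg_i + 1)) + 1 := by omega
        rw [h3]
        cases row[j]? <;> simp
      · rw [if_neg h2, if_neg hj, if_neg (by omega)]

theorem pvRowFill_nil (row : List (List (List Int))) (seg_i : Nat) :
    pvRowFill row seg_i [] = row := rfl

theorem map_singleton_eq_range (l : List (List Int)) :
    l.map (fun x => ([x] : List (List Int))) =
      (List.range l.length).map (fun s => [l.getD s []]) := by
  apply List.ext_getElem?
  intro j
  by_cases hj : j < l.length
  · simp only [List.getElem?_map, List.getElem?_range hj, Option.map_some]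
    rw [List.getElem?_eq_getElem hj]
    simp [List.getD_eq_getElem?_getD, List.getElem?_eq_getElem hj]
  · simp [hj]

-- a whole patient loop of feature 0, pointwise
theorem patLoop_zero_get (pats : List (List (List Int))) (p0 : Nat)
    (dr : List (List (List (List Int))))
    (hdr : ∀ q, p0 ≤ q → q < p0 + pats.length → dr[q]? = some []) (q : Nat) :
    (pvPatLoop 0 pats p0 dr)[q]? =
      if p0 ≤ q ∧ q < p0 + pats.length then
        some ((pats.getD (q - p0) []).map (fun x => [x]))
      else dr[q]? := by
  induction pats generalizing p0 dr with
  | nil => simp [pvPatLoop]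
  | cons pd rest ih =>
    simp only [List.length_cons] at hdr ⊢
    rw [pvPatLoop, segLoop_zero,
      ih (p0 + 1) _ (fun r h1 h2 => by
        rw [getElem?_modify', if_neg (by omega)]
        exact hdr r (by omega) (by omega))]
    by_cases h2 : p0 + 1 ≤ q ∧ q < p0 + 1 + rest.length
    · rw [if_pos h2, if_pos (by omega)]
      have : q - p0 = (q - (p0 + 1)) + 1 := by omega
      simp [this]
    · rw [if_neg h2, getElem?_modify']
      by_cases hq : p0 = q
      · subst hq
        rw [if_pos rfl, hdr p0 (le_refl _) (by omega), if_pos ⟨le_refl _, by omega⟩,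
          Nat.sub_self, Option.map_some]
        rw [show pvRow0 ([] : List (List (List Int))) 0 pd = [] ++ pd.map (fun x => [x]) from
          row0_full pd [] rfl]
        simp
      · rw [if_neg hq, if_neg (by omega)]

-- a whole patient loop of a later feature, pointwise
theorem patLoop_ne_get (f_i : Nat) (h : f_i ≠ 0) (pats : List (List (List Int))) (p0 : Nat)
    (dr : List (List (List (List Int)))) (q : Nat) :
    (pvPatLoop f_i pats p0 dr)[q]? =
      if p0 ≤ q ∧ q < p0 + pats.length then
        (dr[q]?).map (fun row => pvRowFill row 0 (pats.getD (q - p0) []))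
      else dr[q]? := by
  induction pats generalizing p0 dr with
  | nil => simp [pvPatLoop]
  | cons pd rest ih =>
    simp only [List.length_cons]
    rw [pvPatLoop, segLoop_ne _ _ h, ih (p0 + 1)]
    by_cases h2 : p0 + 1 ≤ q ∧ q < p0 + 1 + rest.length
    · rw [if_pos h2, if_pos (by omega), getElem?_modify', if_neg (by omega)]
      have : q - p0 = (q - (p0 + 1)) + 1 := by omega
      simp [this]
    · rw [if_neg h2, getElem?_modify']
      by_cases hq : p0 = q
      · subst hq
        rw [if_pos rfl, if_pos ⟨le_refl _, by omega⟩, Nat.sub_self]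
        simp
      · rw [if_neg hq, if_neg (by omega)]

-- applying one later feature to a row that is already a range-map of cells
theorem rowA_as_map (pd : List (List Int)) (n : Nat) (g : Nat → List (List Int))
    (hlen : pd.length ≤ n) :
    pvRowFill ((List.range n).map g) 0 pd =
      (List.range n).map (fun s => g s ++ (if s < pd.length then [pd.getD s []] else [])) := by
  apply List.ext_getElem?
  intro j
  rw [rowA_get]
  by_cases hj : j < n
  · by_cases hs : j < pd.length
    · rw [if_pos (by constructor <;> omega)]
      simp [hj, hs]
    · rw [if_neg (by omega)]
      simp [hj, hs]
  · rw [if_neg (by omega)]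
    simp [hj]

-- B's outer patient loop, pointwise
theorem pvPatRows_get (data : List (List (List (List Int)))) (pats : List (List (List Int)))
    (p0 j : Nat) :
    (pvPatRows data pats p0)[j]? =
      (pats[j]?).map (fun pat0 =>
        data.foldl (fun row f =>
          pvRowFill row 0 (if p0 + j < f.length then f.getD (p0 + j) [] else []))
          (List.replicate pat0.length [])) := by
  induction pats generalizing p0 j with
  | nil => simp [pvPatRows]
  | cons pat0 rest ih =>
    cases j with
    | zero => simp [pvPatRows]
    | succ j =>
      show (pvPatRows data rest (p0 + 1))[j]? = _
      rw [ih (p0 + 1) j]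
      have h : p0 + 1 + j = p0 + (j + 1) := by omega
      simp [h]

-- B's feature fold over a row that is a range-map of cells
theorem fill_fold (fs : List (List (List (List Int)))) (q n : Nat) (g : Nat → List (List Int))
    (h : ∀ f ∈ fs, q < f.length → (f.getD q []).length ≤ n) :
    fs.foldl (fun row f => pvRowFill row 0 (if q < f.length then f.getD q [] else []))
        ((List.range n).map g) =
      (List.range n).map (fun s => g s ++ pvCell fs q s) := by
  induction fs generalizing g with
  | nil => simp [pvCell]
  | cons f rest ih =>
    rw [List.foldl_cons]
    by_cases hq : q < f.length
    · rw [if_pos hq, rowA_as_map _ _ _ (h f (by simp) hq),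
        ih _ (fun g hg hql => h g (by simp [hg]) hql)]
      apply List.map_congr_left
      intro s hs
      rw [List.append_assoc]
      congr 1
      simp only [pvCell, List.filterMap_cons]
      by_cases hc : s < (f.getD q []).length
      · rw [if_pos hc, if_pos ⟨hq, hc⟩]; rfl
      · rw [if_neg hc, if_neg (fun hx : q < f.length ∧ s < (f.getD q []).length => hc hx.2)]
        simp
    · rw [if_neg hq]
      show rest.foldl _ ((List.range n).map g) = _
      rw [ih _ (fun g hg hql => h g (by simp [hg]) hql)]
      apply List.map_congr_left
      intro s hs
      congr 1
      simp only [pvCell, List.filterMap_cons,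
        if_neg (fun hx : q < f.length ∧ s < (f.getD q []).length => hq hx.1)]

-- the per-feature admissibility condition extracted from Pre_
def pvCond (d0 : List (List (List Int))) (f : List (List (List Int))) : Prop :=
  ∀ p ∈ List.range f.length,
    f.getD p [] = [] ∨ (p < d0.length ∧ (f.getD p []).length ≤ (d0.getD p []).length)

-- the feature loop over the tail features, pointwise, with the accumulated cells abstracted
theorem featLoop_get (d0 : List (List (List Int))) (fs : List (List (List (List Int))))
    (f_i : Nat) (hfi : f_i ≠ 0) (hfs : ∀ f ∈ fs, pvCond d0 f)
    (c : Nat → Nat → List (List Int)) (dr : List (List (List (List Int))))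
    (hdr : ∀ q, dr[q]? = if q < d0.length then
        some ((List.range (d0.getD q []).length).map (c q)) else none) :
    ∀ q, (pvFeatLoop fs f_i dr)[q]? =
      if q < d0.length then
        some ((List.range (d0.getD q []).length).map (fun s => c q s ++ pvCell fs q s))
      else none := by
  induction fs generalizing f_i c dr with
  | nil => intro q; rw [pvFeatLoop, hdr]; simp [pvCell]
  | cons f rest ih =>
    intro q
    rw [pvFeatLoop]
    have hcond := hfs f (by simp)
    have hrec := ih (f_i + 1) (by omega) (fun g hg => hfs g (by simp [hg]))
      (fun q s => c q s ++ (if q < f.length ∧ s < (f.getD q []).length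
        then [(f.getD q []).getD s []] else []))
      (pvPatLoop f_i f 0 dr) ?_ q
    · rw [hrec]
      by_cases hq : q < d0.length
      · rw [if_pos hq, if_pos hq]
        congr 1
        apply List.map_congr_left
        intro s hs
        simp only [List.mem_range] at hs
        rw [List.append_assoc]
        congr 1
        simp only [pvCell, List.filterMap_cons]
        by_cases hc : q < f.length ∧ s < (f.getD q []).length
        · rw [if_pos hc, if_pos hc]; rfl
        · rw [if_neg hc, if_neg hc]; simp
      · rw [if_neg hq, if_neg hq]
    · intro r
      rw [patLoop_ne_get f_i hfi f 0 dr r, hdr r]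
      by_cases hr : r < d0.length
      · rw [if_pos hr, if_pos hr]
        by_cases hrf : r < f.length
        · rw [if_pos ⟨Nat.zero_le _, by omega⟩]
          simp only [Nat.sub_zero, Option.map_some]
          congr 1
          rcases hcond r (by simpa using hrf) with hemp | ⟨_, hle⟩
          · have hemp' : f[r]?.getD ([] : List (List Int)) = [] := by
              simpa [List.getD_eq_getElem?_getD] using hemp
            simp [hemp', pvRowFill_nil]
          · rw [rowA_as_map _ _ _ (by simpa using hle)]
            apply List.map_congr_left
            intro s hs
            simp [hrf]
        · rw [if_neg (by omega)]
          congr 1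
          apply List.map_congr_left
          intro s hs
          simp [hrf]
      · rw [if_neg hr, if_neg hr]
        by_cases hrf : r < f.length
        · rw [if_pos ⟨Nat.zero_le _, by omega⟩]; rfl
        · rw [if_neg (by omega)]

-- ===== VERDICT (by name: the statement is the Claim_ definition above) =====
theorem reshape_data_spec : Claim_equal_reshape_data := by
  intro data _ hpre
  rcases hpre with ⟨hne, hsh⟩
  obtain ⟨d0, rest, rfl⟩ : ∃ d0 rest, data = d0 :: rest := by
    cases data with
    | nil => exact absurd rfl hne
    | cons a l => exact ⟨a, l, rfl⟩
  unfold Spec_reshape_data reshape_data reshape_data_alt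
  simp only [List.headD_cons]
  -- initial state after feature 0
  have h0 : ∀ q, (pvPatLoop 0 d0 0 (List.replicate d0.length ([] : List (List (List Int)))))[q]? =
      if q < d0.length then
        some ((List.range (d0.getD q []).length).map
          (fun s => [(d0.getD q []).getD s []])) else none := by
    intro q
    rw [patLoop_zero_get d0 0 _ (fun r _ h2 => by
      simp only [Nat.zero_add] at h2
      simp [h2]) q]
    by_cases hq : q < d0.length
    · rw [if_pos ⟨Nat.zero_le _, by omega⟩, if_pos hq, Nat.sub_zero,
        map_singleton_eq_range]
    · rw [if_neg (by omega), if_neg hq]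
      simp [hq]
  have hrect : ∀ f ∈ d0 :: rest, ∀ p ∈ List.range f.length,
      (p < d0.length → (f.getD p []).length ≤ (d0.getD p []).length) ∧
      (d0.length ≤ p → f.getD p [] = []) := by
    simpa using hsh
  have hfs : ∀ f ∈ rest, pvCond d0 f := by
    intro f hf p hp
    by_cases hpd : p < d0.length
    · exact Or.inr ⟨hpd, (hrect f (by simp [hf]) p hp).1 hpd⟩
    · exact Or.inl ((hrect f (by simp [hf]) p hp).2 (le_of_not_gt hpd))
  have hmain := featLoop_get d0 rest 1 (by omega)
    hfs (fun q s => [(d0.getD q []).getD s []]) _ h0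
  show pvFeatLoop (d0 :: rest) 0 _ = pvPatRows (d0 :: rest) d0 0
  rw [pvFeatLoop]
  apply List.ext_getElem?
  intro q
  rw [hmain q, pvPatRows_get]
  by_cases hq : q < d0.length
  · rw [if_pos hq, List.getElem?_eq_getElem hq, Option.map_some]
    have hn : (d0[q].length : Nat) = (d0.getD q []).length := by
      simp [List.getD_eq_getElem?_getD, List.getElem?_eq_getElem hq]
    have hrep : (List.replicate d0[q].length ([] : List (List Int))) =
        (List.range d0[q].length).map (fun _ => []) := by
      simp
    simp only [Nat.zero_add]
    rw [hrep, fill_fold (d0 :: rest) q d0[q].length (fun _ => [])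
      (fun f hf hql => hn ▸ (hrect f hf q (by simpa using hql)).1 hq), hn]
    congr 1
    apply List.map_congr_left
    intro s hs
    simp only [List.mem_range] at hs
    simp only [pvCell, List.filterMap_cons,
      if_pos (⟨hq, hs⟩ : q < d0.length ∧ s < (d0.getD q []).length)]
    rfl
  · rw [if_neg hq, List.getElem?_eq_none (by omega), Option.map_none]
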